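-- pv_equiv track=rewrite | github.com/VectorInstitute/vectorlm | data_utils.py | pack_examples
-- ===== SOURCE A (Python) =====
-- def pack_examples(examples, block_size, packing_type='partial'):
--     r''' Used with a prepared HF dataset, will pack/group examples. Use with care, can mess up many things
--     if the input is not formated properly (requires the <|eod|> token).
--
--     packing_type: partial/full/no
--     '''
--     # Concatenate all texts.
--     if packing_type == 'partial':
--         result = {k:[] for k in examples.keys()}
--         # _key = list(examples.keys())[0] # Take whichever key
--         _key = 'input_ids'
--         new_example = {k:[] for k in examples.keys()}
--
--         for ind in range(len(examples[_key])):
--             # Trim long sequences to block_size, this is required for partial packing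
--             example = {k:v[ind][0:block_size] for k,v in examples.items()}
--             if len(new_example[_key]) + len(example[_key]) > block_size:
--                 result = {k:result[k] + [v] for k,v in new_example.items()}
--                 new_example = example
--             else:
--                 new_example = {k:new_example[k] + v for k,v in example.items()}
--         #  Add the last example if there is something to add
--         if len(new_example[_key]) > 0:
--             result = {k:result[k] + [v] for k,v in new_example.items()}
--     elif packing_type == 'full':
--         # Full packing
--         concatenated_examples = {k: sum(examples[k], []) for k in examples.keys()}
--         total_length = len(concatenated_examples[list(examples.keys())[0]])
--         total_length = (total_length // block_size) * block_size
--         # Split by chunks of max_len.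
--         result = {
--             k: [t[i : i + block_size] for i in range(0, total_length, block_size)]
--             for k, t in concatenated_examples.items()
--         }
--     else:
--         # Do nothing
--         result = examples
--     return result
-- ===== SOURCE B (Python) =====
-- def pack_examples(examples, block_size, packing_type='partial'):
--     if packing_type == 'partial':
--         # Pass 0: trim every sequence to block_size.
--         trimmed = {k: [seq[0:block_size] for seq in v] for k, v in examples.items()}
--         # Pass 1 (planning): group consecutive example indices by input_ids length.
--         groups = []
--         running = 0
--         count = 0
--         for L in (len(seq) for seq in trimmed['input_ids']):
--             if running + L > block_size:
--                 groups.append(count)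
--                 running, count = 0, 0
--             running += L
--             count += 1
--         if running > 0:
--             groups.append(count)
--         # Pass 2 (assembly): concatenate each group's sequences, per key.
--         result = {}
--         for k, v in trimmed.items():
--             blocks = []
--             start = 0
--             for g in groups:
--                 block = []
--                 for seq in v[start:start + g]:
--                     block += seq
--                 blocks.append(block)
--                 start += g
--             result[k] = blocks
--         return result
--     elif packing_type == 'full':
--         keys = list(examples.keys())
--         concatenated = {k: [x for seq in examples[k] for x in seq] for k in keys}
--         nblocks = len(concatenated[keys[0]]) // block_size
--         return {
--             k: [t[i * block_size:(i + 1) * block_size] for i in range(nblocks)]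
--             for k, t in concatenated.items()
--         }
--     else:
--         return examples
-- ===== Notes on version B (the rewrite author's own statement) =====
-- stated objective: alternative
-- what changed: The partial branch is split into three separate passes (trim all sequences, plan a list of consecutive group sizes from the input_ids lengths, then assemble each block per key from the plan) instead of interleaving flushing and accumulation in one dict-state loop; the full branch concatenates by flat comprehension and indexes blocks by block count rather than by a stepped range.
import Mathlib
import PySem

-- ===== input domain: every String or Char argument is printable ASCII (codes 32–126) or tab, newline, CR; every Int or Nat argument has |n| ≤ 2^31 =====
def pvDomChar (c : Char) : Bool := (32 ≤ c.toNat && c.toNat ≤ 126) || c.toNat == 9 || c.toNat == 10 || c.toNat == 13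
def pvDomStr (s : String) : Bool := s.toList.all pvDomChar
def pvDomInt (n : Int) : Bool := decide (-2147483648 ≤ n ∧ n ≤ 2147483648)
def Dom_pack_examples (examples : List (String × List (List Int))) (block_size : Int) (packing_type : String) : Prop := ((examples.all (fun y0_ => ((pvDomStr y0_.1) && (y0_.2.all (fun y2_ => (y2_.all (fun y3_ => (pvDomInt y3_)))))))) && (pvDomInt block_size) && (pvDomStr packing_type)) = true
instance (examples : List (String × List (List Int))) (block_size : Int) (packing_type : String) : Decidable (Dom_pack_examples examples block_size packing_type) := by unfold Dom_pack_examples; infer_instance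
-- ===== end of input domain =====

-- B separates the partial branch into a planning pass (group sizes from input_ids lengths) and an
-- assembly pass (concatenate each group per key); objective: alternative decomposition, same cost.

-- ===== PORT A =====
-- 'result = {k: result[k] + [v] for k, v in new_example.items()}' (used twice in A)
def aFlush (result : List (String × List (List Int))) (new_example : List (String × List Int)) :
    List (String × List (List Int)) :=
  new_example.map (fun kv => (kv.1, (PySem.Dict.mk result).getD kv.1 [] ++ [kv.2]))

-- the body of A's 'for ind in range(len(examples[_key]))' loop
def aStep (examples : List (String × List (List Int))) (block_size : Int)
    (st : List (String × List (List Int)) × List (String × List Int)) (ind : Nat) :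
    List (String × List (List Int)) × List (String × List Int) :=
  let exmpl := examples.map (fun kv =>
    (kv.1, PySem.List.slice (PySem.List.pyGetD kv.2 (ind : Int) []) (some 0) (some block_size)))
  if (((PySem.Dict.mk st.2).getD "input_ids" []).length : Int) +
      (((PySem.Dict.mk exmpl).getD "input_ids" []).length : Int) > block_size then
    (aFlush st.1 st.2, exmpl)
  else
    (st.1, exmpl.map (fun kv => (kv.1, (PySem.Dict.mk st.2).getD kv.1 [] ++ kv.2)))

def pack_examples (examples : List (String × List (List Int))) (block_size : Int) (packing_type : String) : List (String × List (List Int)) :=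
  if packing_type = "partial" then
    let n := ((PySem.Dict.mk examples).getD "input_ids" []).length
    let st := (List.range n).foldl (aStep examples block_size)
      (examples.map (fun kv => (kv.1, ([] : List (List Int)))),
       examples.map (fun kv => (kv.1, ([] : List Int))))
    if (((PySem.Dict.mk st.2).getD "input_ids" []).length : Int) > 0 then aFlush st.1 st.2
    else st.1
  else if packing_type = "full" then
    let ks := examples.map Prod.fst
    let concatenated := ks.map (fun k =>
      (k, ((PySem.Dict.mk examples).getD k []).foldl (fun acc x => acc ++ x) []))
    let total := (((PySem.Dict.mk concatenated).getD (PySem.List.pyGetD ks 0 "") []).length : Int)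
    let total' := PySem.Int.floordiv total block_size * block_size
    concatenated.map (fun kv =>
      (kv.1, (PySem.List.pyRange 0 total' block_size).map
        (fun i => PySem.List.slice kv.2 (some i) (some (i + block_size)))))
  else examples

-- ===== PORT B =====
-- planning loop body: flush the running group when it would overflow, then add the next length
def bPlanStep (block_size : Int) (st : List Nat × Nat × Nat) (L : Nat) : List Nat × Nat × Nat :=
  let st' := if (st.2.1 : Int) + (L : Int) > block_size then (st.1 ++ [st.2.2], 0, 0) else st
  (st'.1, st'.2.1 + L, st'.2.2 + 1)

def bPlan (block_size : Int) (lengths : List Nat) : List Nat × Nat × Nat :=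
  lengths.foldl (bPlanStep block_size) ([], 0, 0)

-- 'block = []; for seq in v[start:start+g]: block += seq'
def bBlock (v : List (List Int)) (start g : Nat) : List Int :=
  (PySem.List.slice v (some (start : Int)) (some ((start : Int) + (g : Int)))).foldl
    (fun acc x => acc ++ x) []

-- assembly loop over the planned group sizes, carrying (blocks, start)
def bAssemble (v : List (List Int)) (groups : List Nat) : List (List Int) × Nat :=
  groups.foldl (fun st g => (st.1 ++ [bBlock v st.2 g], st.2 + g)) ([], 0)

def pack_examples_alt (examples : List (String × List (List Int))) (block_size : Int) (packing_type : String) : List (String × List (List Int)) :=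
  if packing_type = "partial" then
    let trimmed := examples.map (fun kv =>
      (kv.1, kv.2.map (fun seq => PySem.List.slice seq (some 0) (some block_size))))
    let plan := bPlan block_size
      (((PySem.Dict.mk trimmed).getD "input_ids" []).map (fun seq => seq.length))
    let groups := if plan.2.1 > 0 then plan.1 ++ [plan.2.2] else plan.1
    trimmed.map (fun kv => (kv.1, (bAssemble kv.2 groups).1))
  else if packing_type = "full" then
    let ks := examples.map Prod.fst
    let concatenated := ks.map (fun k =>
      (k, ((PySem.Dict.mk examples).getD k []).flatMap (fun seq => seq)))
    let nblocks := PySem.Int.floordiv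
      (((PySem.Dict.mk concatenated).getD (ks.headD "") []).length : Int) block_size
    concatenated.map (fun kv =>
      (kv.1, (List.range nblocks.toNat).map
        (fun (i : Nat) => PySem.List.slice kv.2 (some ((i : Int) * block_size)) (some (((i : Int) + 1) * block_size)))))
  else examples

-- ===== PRECONDITION & SPEC =====
-- Pre_ excludes: association lists whose keys repeat (they denote no Python dict, so no cite is possible);
-- for 'partial' the inputs where A raises KeyError ('input_ids' missing) or IndexError (some value
-- shorter than examples['input_ids']); for 'full' the inputs where A raises IndexError (empty dict)
-- or ZeroDivisionError (block_size = 0).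
def Pre_pack_examples (examples : List (String × List (List Int))) (block_size : Int) (packing_type : String) : Prop :=
  (examples.map Prod.fst).Nodup ∧
  (packing_type = "partial" → "input_ids" ∈ examples.map Prod.fst ∧
    ∀ kv ∈ examples, ((PySem.Dict.mk examples).getD "input_ids" []).length ≤ kv.2.length) ∧
  (packing_type = "full" → examples ≠ [] ∧ block_size ≠ 0)
instance (examples : List (String × List (List Int))) (block_size : Int) (packing_type : String) : Decidable (Pre_pack_examples examples block_size packing_type) := by unfold Pre_pack_examples; infer_instance

def pvWitness_pack_examples : (List (String × List (List Int))) × Int × String :=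
  ([("input_ids", [[1, 2], [3]]), ("labels", [[1, 2], [3]])], 2, "partial")

def Spec_pack_examples (examples : List (String × List (List Int))) (block_size : Int) (packing_type : String) (out : List (String × List (List Int))) : Prop := out = pack_examples_alt examples block_size packing_type
instance (examples : List (String × List (List Int))) (block_size : Int) (packing_type : String) (out : List (String × List (List Int))) : Decidable (Spec_pack_examples examples block_size packing_type out) := by unfold Spec_pack_examples; infer_instance

-- ===== CLAIM (what is proved, stated in full; the proofs are below) =====
def Claim_equal_pack_examples : Prop := ∀ (examples : List (String × List (List Int))) (block_size : Int) (packing_type : String), Dom_pack_examples examples block_size packing_type → Pre_pack_examples examples block_size packing_type → Spec_pack_examples examples block_size packing_type (pack_examples examples block_size packing_type)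

-- ===== LEMMAS AND PROOFS =====
theorem getD_mk_map {α β : Type} (l : List (String × α)) (g : String × α → β) (dflt : β)
    (hnd : (l.map Prod.fst).Nodup) {kv : String × α} (h : kv ∈ l) :
    (PySem.Dict.mk (l.map (fun x => (x.1, g x)))).getD kv.1 dflt = g kv := by
  apply PySem.Dict.getD_of_mem_items
  · exact List.mem_map_of_mem h
  · simpa [PySem.Dict.keys, Function.comp] using hnd

theorem getD_mk_self (l : List (String × List (List Int)))
    (hnd : (l.map Prod.fst).Nodup) {kv : String × List (List Int)} (h : kv ∈ l) :
    (PySem.Dict.mk l).getD kv.1 [] = kv.2 := by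
  apply PySem.Dict.getD_of_mem_items
  · simpa using h
  · simpa [PySem.Dict.keys] using hnd

-- the per-entry trimmed value
def tv (bs : Int) (kv : String × List (List Int)) : List (List Int) :=
  kv.2.map (fun seq => PySem.List.slice seq (some 0) (some bs))

theorem bAssemble_foldl_snd (v : List (List Int)) (gs : List Nat) (st : List (List Int) × Nat) :
    (gs.foldl (fun st g => (st.1 ++ [bBlock v st.2 g], st.2 + g)) st).2 = st.2 + gs.sum := by
  induction gs generalizing st with
  | nil => simp
  | cons a t ih => simp [List.foldl_cons, ih]; omega

theorem bAssemble_append (v : List (List Int)) (gs : List Nat) (c : Nat) :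
    bAssemble v (gs ++ [c]) = ((bAssemble v gs).1 ++ [bBlock v gs.sum c], gs.sum + c) := by
  unfold bAssemble
  rw [List.foldl_append]
  have h := bAssemble_foldl_snd v gs ([], 0)
  simp [List.foldl_cons, h]

theorem bBlock_eq (v : List (List Int)) (s g : Nat) :
    bBlock v s g = ((v.drop s).take g).flatten := by
  unfold bBlock
  rw [PySem.List.slice_natCast_add, PySem.List.foldl_append_eq_flatten]
  simp

theorem main_inv (examples : List (String × List (List Int))) (bs : Int)
    (hnd : (examples.map Prod.fst).Nodup)
    (kv0 : String × List (List Int)) (hkv0 : kv0 ∈ examples) (hk0 : kv0.1 = "input_ids")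
    (hlen : ∀ kv ∈ examples, kv0.2.length ≤ kv.2.length)
    (L : List Nat) (hL : L = (tv bs kv0).map List.length)
    (i : Nat) (hi : i ≤ kv0.2.length) :
    (List.range i).foldl (aStep examples bs)
      (examples.map (fun kv => (kv.1, ([] : List (List Int)))),
       examples.map (fun kv => (kv.1, ([] : List Int)))) =
      (examples.map (fun kv => (kv.1, (bAssemble (tv bs kv) (bPlan bs (L.take i)).1).1)),
       examples.map (fun kv =>
         (kv.1, (((tv bs kv).drop (bPlan bs (L.take i)).1.sum).take (bPlan bs (L.take i)).2.2).flatten)))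
    ∧ (bPlan bs (L.take i)).1.sum + (bPlan bs (L.take i)).2.2 = i
    ∧ ((bPlan bs (L.take i)).2.1 : Nat) = ((L.drop (bPlan bs (L.take i)).1.sum).take (bPlan bs (L.take i)).2.2).sum := by
  induction i with
  | zero =>
    refine ⟨?_, by simp [bPlan], by simp [bPlan]⟩
    simp [bPlan, bAssemble]
  | succ i ih =>
    obtain ⟨hA, hsum, hr⟩ := ih (Nat.le_of_succ_le hi)
    have hi' : i < kv0.2.length := hi
    have hiL : i < L.length := by simp [hL, tv]; omega
    have htake : L.take (i+1) = L.take i ++ [L[i]] := by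
      rw [List.take_add_one]; simp [List.getElem?_eq_getElem hiL]
    have hplan1 : bPlan bs (L.take (i+1)) = bPlanStep bs (bPlan bs (L.take i)) L[i] := by
      rw [htake]; unfold bPlan; rw [List.foldl_append]; simp
    rw [List.range_succ, List.foldl_append, hA]
    rw [hplan1]
    simp only [List.foldl_cons, List.foldl_nil]
    set P := bPlan bs (L.take i) with hP
    have hE0 : (PySem.Dict.mk (examples.map (fun kv =>
        (kv.1, PySem.List.slice (PySem.List.pyGetD kv.2 (i : Int) []) (some 0) (some bs))))).getD "input_ids" []
        = PySem.List.slice (PySem.List.pyGetD kv0.2 (i : Int) []) (some 0) (some bs) := by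
      rw [← hk0]; exact getD_mk_map _ _ _ hnd hkv0
    have hslice : ∀ kv : String × List (List Int), ∀ hm : kv ∈ examples,
        PySem.List.slice (PySem.List.pyGetD kv.2 (i : Int) []) (some 0) (some bs)
          = (tv bs kv)[i]'(by simp [tv]; exact lt_of_lt_of_le hi' (hlen kv hm)) := by
      intro kv hm
      have h2 : i < kv.2.length := lt_of_lt_of_le hi' (hlen kv hm)
      simp [tv, PySem.List.pyGetD_natCast, List.getElem?_eq_getElem h2]
    have hN0 : (PySem.Dict.mk (examples.map (fun kv =>
        (kv.1, (((tv bs kv).drop P.1.sum).take P.2.2).flatten)))).getD "input_ids" []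
        = (((tv bs kv0).drop P.1.sum).take P.2.2).flatten := by
      rw [← hk0]; exact getD_mk_map _ _ _ hnd hkv0
    have hNlen : ((((tv bs kv0).drop P.1.sum).take P.2.2).flatten).length
        = ((L.drop P.1.sum).take P.2.2).sum := by
      simp [List.length_flatten, hL, List.map_take, List.map_drop]
    have hElen : ((tv bs kv0)[i]'(by simpa [tv] using hi')).length = L[i] := by
      simp [hL]
    unfold aStep
    simp only [hE0, hN0, hslice kv0 hkv0, hNlen, hElen, ← hr]
    unfold bPlanStep
    split_ifs with hc
    · -- flush
      refine ⟨Prod.ext ?_ ?_, by simp; omega, by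
        simp [List.take_add_one, List.getElem?_eq_getElem hiL, hsum]⟩
      · unfold aFlush
        rw [List.map_map]
        refine List.map_congr_left ?_
        intro kv hm
        simp only [Function.comp]
        rw [getD_mk_map _ _ _ hnd hm, bAssemble_append, bBlock_eq]
      · refine List.map_congr_left ?_
        intro kv hm
        have h2 : i < (tv bs kv).length := by
          simp [tv]; exact lt_of_lt_of_le hi' (hlen kv hm)
        rw [hslice kv hm]
        simp only [List.sum_append, List.sum_cons, List.sum_nil, Nat.add_zero, hsum]
        rw [List.take_add_one]
        simp [List.getElem?_drop, List.getElem?_eq_getElem h2]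
    · -- accumulate
      refine ⟨Prod.ext rfl ?_, by simp; omega, ?_⟩
      · rw [List.map_map]
        refine List.map_congr_left ?_
        intro kv hm
        simp only [Function.comp]
        rw [getD_mk_map _ _ _ hnd hm, hslice kv hm]
        have h2 : i < (tv bs kv).length := by
          simp [tv]; exact lt_of_lt_of_le hi' (hlen kv hm)
        rw [List.take_add_one]
        simp [List.getElem?_drop, hsum, List.getElem?_eq_getElem h2]
      · simp only []
        rw [List.take_add_one]
        simp [List.getElem?_drop, hsum, hr, List.getElem?_eq_getElem hiL]

theorem partial_eq (examples : List (String × List (List Int))) (bs : Int)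
    (hnd : (examples.map Prod.fst).Nodup)
    (hmem : "input_ids" ∈ examples.map Prod.fst)
    (hlen : ∀ kv ∈ examples, ((PySem.Dict.mk examples).getD "input_ids" []).length ≤ kv.2.length) :
    pack_examples examples bs "partial" = pack_examples_alt examples bs "partial" := by
  obtain ⟨kv0, hkv0, hk0⟩ := List.mem_map.mp hmem
  have hget : (PySem.Dict.mk examples).getD "input_ids" [] = kv0.2 := by
    rw [← hk0]; exact getD_mk_self examples hnd hkv0
  have hlen' : ∀ kv ∈ examples, kv0.2.length ≤ kv.2.length := by
    intro kv hm; have := hlen kv hm; rwa [hget] at this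
  set L : List Nat := (tv bs kv0).map List.length with hL
  have hLn : L.length = kv0.2.length := by simp [hL, tv]
  have hmain := main_inv examples bs hnd kv0 hkv0 hk0 hlen' L rfl kv0.2.length le_rfl
  have htk : L.take kv0.2.length = L := by rw [← hLn]; exact List.take_length
  rw [htk] at hmain
  obtain ⟨hA, hsum, hr⟩ := hmain
  unfold pack_examples pack_examples_alt
  simp only [reduceIte, hget, hA]
  have htrim : (PySem.Dict.mk (examples.map (fun kv =>
      (kv.1, kv.2.map (fun seq => PySem.List.slice seq (some 0) (some bs)))))).getD "input_ids" []
      = tv bs kv0 := by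
    rw [← hk0]; exact getD_mk_map _ _ _ hnd hkv0
  rw [htrim]
  have hN0 : (PySem.Dict.mk (examples.map (fun kv =>
      (kv.1, (((tv bs kv).drop (bPlan bs L).1.sum).take (bPlan bs L).2.2).flatten)))).getD "input_ids" []
      = (((tv bs kv0).drop (bPlan bs L).1.sum).take (bPlan bs L).2.2).flatten := by
    rw [← hk0]; exact getD_mk_map _ _ _ hnd hkv0
  rw [hN0]
  have hNlen : ((((tv bs kv0).drop (bPlan bs L).1.sum).take (bPlan bs L).2.2).flatten).length
      = (bPlan bs L).2.1 := by
    simp [List.length_flatten, List.map_take, List.map_drop]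
    exact hr.symm
  rw [hNlen]
  have hBout : ∀ G : List Nat, (examples.map (fun kv =>
        (kv.1, kv.2.map (fun seq => PySem.List.slice seq (some 0) (some bs))))).map
          (fun kv => (kv.1, (bAssemble kv.2 G).1))
      = examples.map (fun kv => (kv.1, (bAssemble (tv bs kv) G).1)) := by
    intro G; rw [List.map_map]; rfl
  rw [hBout]
  have hLfun : (tv bs kv0).map (fun seq => seq.length) = L := rfl
  rw [hLfun]
  by_cases hc : (bPlan bs L).2.1 > 0
  · rw [if_pos (by exact_mod_cast hc), if_pos hc]
    unfold aFlush
    rw [List.map_map]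
    refine List.map_congr_left ?_
    intro kv hm
    simp only [Function.comp]
    rw [getD_mk_map _ _ _ hnd hm, bAssemble_append, bBlock_eq]
  · rw [if_neg (by exact_mod_cast hc), if_neg hc]

theorem full_range_eq (t : List Int) (bs q : Int) (hbs : bs ≠ 0) (hq : 0 ≤ q * bs)
    (hqs : 0 < bs → 0 ≤ q) :
    (PySem.List.pyRange 0 (q * bs) bs).map
        (fun i => PySem.List.slice t (some i) (some (i + bs)))
      = (List.range q.toNat).map
        (fun (j : Nat) => PySem.List.slice t (some ((j : Int) * bs)) (some (((j : Int) + 1) * bs))) := by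
  rcases lt_or_gt_of_ne hbs with hneg | hpos
  · have hq0 : q ≤ 0 := by nlinarith
    have h1 : PySem.List.pyRange 0 (q * bs) bs = [] := by
      simp [PySem.List.pyRange, hbs, not_lt.mpr (le_of_lt hneg), not_lt.mpr hq]
    have h2 : q.toNat = 0 := by omega
    simp [h1, h2]
  · have hq0 : 0 ≤ q := hqs hpos
    have hcount : PySem.List.pyRange 0 (q * bs) bs
        = (List.range q.toNat).map (fun (k : Nat) => (0:Int) + bs * (k : Int)) := by
      rw [PySem.List.pyRange_of_pos _ _ hpos]
      have hcnt : (if (0:Int) < q * bs then ((q * bs - 0 + bs - 1) / bs).toNat else 0) = q.toNat := by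
        by_cases hz : (0:Int) < q * bs
        · have hqpos : 0 < q := by nlinarith
          have heq : (q * bs + bs - 1) / bs = q := by
            have h1 : q * bs + bs - 1 = (bs - 1) + q * bs := by ring
            rw [h1, Int.add_mul_ediv_right _ _ hbs,
              Int.ediv_eq_zero_of_lt (by omega) (by omega)]
            ring
          simp [hz, heq]
        · have hz0 : q * bs = 0 := le_antisymm (not_lt.mp hz) hq
          have hq00 : q = 0 := by
            rcases mul_eq_zero.mp hz0 with h | h
            · exact h
            · exact absurd h hbs
          simp [hq00]
      rw [hcnt]
    rw [hcount, List.map_map]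
    refine List.map_congr_left ?_
    intro j hj
    simp only [Function.comp]
    congr 2
    · ring
    · ring

theorem full_eq (examples : List (String × List (List Int))) (bs : Int)
    (hne : examples ≠ []) (hbs : bs ≠ 0) :
    pack_examples examples bs "full" = pack_examples_alt examples bs "full" := by
  unfold pack_examples pack_examples_alt
  simp only [reduceIte]
  have hcat : (examples.map Prod.fst).map (fun k =>
        (k, ((PySem.Dict.mk examples).getD k []).foldl (fun acc x => acc ++ x) []))
      = (examples.map Prod.fst).map (fun k =>
        (k, ((PySem.Dict.mk examples).getD k []).flatMap (fun seq => seq))) := by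
    refine List.map_congr_left ?_
    intro k _
    rw [PySem.List.foldl_append_eq_flatten]
    simp [List.flatMap_def]
  rw [hcat]
  have hhead : PySem.List.pyGetD (examples.map Prod.fst) 0 "" = (examples.map Prod.fst).headD "" := by
    cases examples with
    | nil => rfl
    | cons a t => simp [PySem.List.pyGetD]
  rw [hhead]
  refine List.map_congr_left ?_
  intro kv hm
  set T : Int := (((PySem.Dict.mk ((examples.map Prod.fst).map (fun k =>
    (k, ((PySem.Dict.mk examples).getD k []).flatMap (fun seq => seq))))).getD
      ((examples.map Prod.fst).headD "") []).length : Int) with hT0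
  have hT : 0 ≤ T := by positivity
  have hqs : 0 < bs → 0 ≤ PySem.Int.floordiv T bs := by
    intro h
    rw [PySem.Int.floordiv_eq_ediv_of_pos h]
    exact Int.ediv_nonneg hT (le_of_lt h)
  have hq : 0 ≤ PySem.Int.floordiv T bs * bs := by
    rcases lt_or_gt_of_ne hbs with hneg | hpos
    · have hb := PySem.Int.mod_neg_bounds (a := T) hneg
      have hd := PySem.Int.floordiv_mul_add_mod T bs
      omega
    · exact mul_nonneg (hqs hpos) (le_of_lt hpos)
  have := full_range_eq kv.2 bs (PySem.Int.floordiv T bs) hbs hq hqs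
  rw [Prod.ext_iff]
  exact ⟨rfl, this⟩

-- ===== VERDICT (by name: the statement is the Claim_ definition above) =====
theorem pack_examples_spec : Claim_equal_pack_examples := by
  intro examples block_size packing_type _ hpre
  obtain ⟨hnd, hpart, hfull⟩ := hpre
  unfold Spec_pack_examples
  by_cases hp : packing_type = "partial"
  · subst hp
    obtain ⟨hmem, hlen⟩ := hpart rfl
    exact partial_eq _ _ hnd hmem hlen
  · by_cases hf : packing_type = "full"
    · subst hf
      obtain ⟨hne, hb⟩ := hfull rfl
      exact full_eq _ _ hne hb
    · unfold pack_examples pack_examples_alt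
      rw [if_neg hp, if_neg hf, if_neg hp, if_neg hf]
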